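-- pv_equiv track=rewrite | github.com/avdvnk/dopuski | nir/functions.py | decode_messages
-- ===== SOURCE A (Python) =====
-- def interference_cancellation(input_slots_state, buffer_size, frame_size, slot_number, subscriber_id):
--     recovered_messages = 0
--     for current_slot, current_messages in input_slots_state.items():
--         if subscriber_id in current_messages:
--             current_messages.remove(subscriber_id)
--     for current_slot, current_messages in input_slots_state.items():
--         if current_slot > slot_number:
--             break
--         if len(current_messages) == 1:
--             recovered_sub_id = current_messages[0]
--             recovered_messages += 1 + interference_cancellation(input_slots_state, buffer_size, frame_size,
--                                                                 slot_number, recovered_sub_id)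
--     return recovered_messages
--
-- def decode_messages(input_slots_state, buffer_size, frame_size):
--     decoded_messages = 0
--     for current_slot, current_messages in input_slots_state.items():
--         if len(current_messages) == 1:
--             current_sub_id = current_messages[0]
--             decoded_messages += 1 + interference_cancellation(input_slots_state,
--                                                               buffer_size, frame_size, current_slot, current_sub_id)
--     return decoded_messages
-- ===== SOURCE B (Python) =====
-- # B: iterative worklist peeling instead of A's recursive restart-scans: the break bound is
-- # computed once per decoded slot, then singleton slots are propagated through a pending stack;
-- # each peel removes the recovered id everywhere exactly as A does (same in-place mutation of
-- # the message lists, same final state).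
-- def decode_messages(input_slots_state, buffer_size, frame_size):
--     keys = list(input_slots_state.keys())
--     slots = list(input_slots_state.values())
--     n = len(keys)
--
--     def bound(s):
--         # first position whose slot number exceeds s (A's 'break' point), else n
--         for j in range(n):
--             if keys[j] > s:
--                 return j
--         return n
--
--     def remove_everywhere(x):
--         # remove one occurrence of x from every slot containing it;
--         # report the slots that became singletons
--         created = []
--         for r, msgs in enumerate(slots):
--             if x in msgs:
--                 msgs.remove(x)
--                 if len(msgs) == 1:
--                     created.append(r)
--         return created
--
--     total = 0
--     for p in range(n):
--         if len(slots[p]) == 1: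
--             total += 1
--             m = bound(keys[p])
--             remove_everywhere(slots[p][0])
--             pending = [q for q in range(m) if len(slots[q]) == 1]
--             while pending:
--                 q = pending.pop()
--                 if len(slots[q]) == 1:
--                     total += 1
--                     for r in remove_everywhere(slots[q][0]):
--                         if r < m:
--                             pending.append(r)
--     return total
-- ===== Notes on version B (the rewrite author's own statement) =====
-- stated objective: alternative
-- what changed: A recovers messages by recursive interference cancellation that rescans the whole frame from slot 0 inside every recursion level; B is iterative: it computes the break bound once per decoded slot and propagates newly created singleton slots through a pending worklist, which yields the same count and final state because the singleton-peeling process is proved confluent (order-independent) in the Lean file.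
import Mathlib
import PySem

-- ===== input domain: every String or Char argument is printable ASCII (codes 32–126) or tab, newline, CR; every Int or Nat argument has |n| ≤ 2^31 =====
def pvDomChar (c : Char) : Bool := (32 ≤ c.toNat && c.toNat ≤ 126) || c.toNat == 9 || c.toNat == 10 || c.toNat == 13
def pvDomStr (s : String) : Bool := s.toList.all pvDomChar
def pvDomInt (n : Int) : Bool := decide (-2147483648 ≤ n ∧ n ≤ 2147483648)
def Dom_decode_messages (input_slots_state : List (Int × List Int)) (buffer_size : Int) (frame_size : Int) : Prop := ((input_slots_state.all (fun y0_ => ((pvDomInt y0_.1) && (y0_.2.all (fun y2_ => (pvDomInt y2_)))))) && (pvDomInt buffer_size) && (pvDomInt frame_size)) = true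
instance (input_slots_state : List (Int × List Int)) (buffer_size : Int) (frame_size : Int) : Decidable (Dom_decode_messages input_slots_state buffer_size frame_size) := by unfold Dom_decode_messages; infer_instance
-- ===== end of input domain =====

-- B replaces A's recursive interference cancellation (which rescans the frame from the start at
-- every recursion level) by one worklist pass per decoded slot; both mutate the caller's message
-- lists in place in Python and provably reach the same final state and count.

-- ===== PORT A =====
-- the dict is an association list iterated positionally; its keys never change, only the
-- message lists do, so the Python for-loops over .items() become index loops reading the
-- current list.  The recursion is totalised with fuel = total number of messages + 1, which
-- is proved sufficient below (Python has no fuel; the 0 branch is never reached).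
def pvMsgD (d : List (Int × List Int)) : Nat := (d.map (fun km => km.2.length)).sum

-- first loop of interference_cancellation: remove one occurrence of x from every slot
def icRemove (x : Int) (d : List (Int × List Int)) : List (Int × List Int) :=
  d.map (fun km => (km.1, if x ∈ km.2 then km.2.erase x else km.2))

mutual
-- second loop of interference_cancellation (break at the first slot number > s)
def icGo (fuel n : Nat) (d : List (Int × List Int)) (s : Int) (i : Nat) :
    Int × List (Int × List Int) :=
  if i < n then
    let km := d.getD i (0, [])
    if km.1 > s then (0, d)
    else if km.2.length = 1 then
      let r := ic fuel d s km.2.headI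
      let r' := icGo fuel n r.2 s (i + 1)
      (1 + r.1 + r'.1, r'.2)
    else icGo fuel n d s (i + 1)
  else (0, d)
termination_by (fuel, n - i, 0)

def ic (fuel : Nat) (d : List (Int × List Int)) (s : Int) (x : Int) :
    Int × List (Int × List Int) :=
  match fuel with
  | 0 => (0, d)
  | fuel + 1 =>
    let d1 := icRemove x d
    icGo fuel d1.length d1 s 0
termination_by (fuel, 0, 1)
end

def decodeGoA (n : Nat) (d : List (Int × List Int)) (i : Nat) : Int :=
  if i < n then
    let km := d.getD i (0, [])
    if km.2.length = 1 then
      let r := ic (pvMsgD d + 1) d km.1 km.2.headI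
      (1 + r.1) + decodeGoA n r.2 (i + 1)
    else decodeGoA n d (i + 1)
  else 0
termination_by n - i

def decode_messages (input_slots_state : List (Int × List Int)) (buffer_size : Int) (frame_size : Int) : Int :=
  decodeGoA input_slots_state.length input_slots_state 0

-- ===== PORT B =====
def pvMsgS (slots : List (List Int)) : Nat := (slots.map List.length).sum

-- bound(s): first position whose slot number exceeds s, else n
def bBound (keys : List Int) (s : Int) (j : Nat) : Nat :=
  if j < keys.length then
    if keys.getD j 0 > s then j else bBound keys s (j + 1)
  else keys.length
termination_by keys.length - j

-- remove_everywhere(x): erase one occurrence of x from every slot, collecting the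
-- positions that became singletons ('for r, msgs in enumerate(slots)')
def removeB (x : Int) (slots : List (List Int)) (base : Nat) : List (List Int) × List Nat :=
  match slots with
  | [] => ([], [])
  | l :: t =>
    let rest := removeB x t (base + 1)
    if x ∈ l then
      let l' := l.erase x
      (l' :: rest.1, if l'.length = 1 then base :: rest.2 else rest.2)
    else (l :: rest.1, rest.2)

-- the 'while pending' worklist; pending is a stack (Python pops from the right, the port
-- pops the head, so lists of pushed items are reversed).  Totalised with fuel
-- = 2 * messages + |pending| + 1, proved sufficient below (the Python loop has no fuel).
def cascadeGo (fuel : Nat) (slots : List (List Int)) (m : Nat) (pending : List Nat) (total : Int) :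
    Int × List (List Int) :=
  match fuel with
  | 0 => (total, slots)
  | fuel + 1 =>
    match pending with
    | [] => (total, slots)
    | q :: rest =>
      if (slots.getD q []).length = 1 then
        let rc := removeB (slots.getD q []).headI slots 0
        cascadeGo fuel rc.1 m (((rc.2.filter (· < m)).reverse) ++ rest) (total + 1)
      else cascadeGo fuel slots m rest total

def decodeGoB (n : Nat) (keys : List Int) (slots : List (List Int)) (p : Nat) (total : Int) : Int :=
  if p < n then
    if (slots.getD p []).length = 1 then
      let m := bBound keys (keys.getD p 0) 0
      let slots1 := (removeB (slots.getD p []).headI slots 0).1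
      let pending := ((List.range m).filter (fun q => (slots1.getD q []).length == 1)).reverse
      let rc := cascadeGo (2 * pvMsgS slots1 + pending.length + 1) slots1 m pending 0
      decodeGoB n keys rc.2 (p + 1) (total + 1 + rc.1)
    else decodeGoB n keys slots (p + 1) total
  else total
termination_by n - p

def decode_messages_alt (input_slots_state : List (Int × List Int)) (buffer_size : Int) (frame_size : Int) : Int :=
  decodeGoB input_slots_state.length (input_slots_state.map Prod.fst) (input_slots_state.map Prod.snd) 0 0

-- ===== PRECONDITION & SPEC =====
def Spec_decode_messages (input_slots_state : List (Int × List Int)) (buffer_size : Int) (frame_size : Int) (out : Int) : Prop := out = decode_messages_alt input_slots_state buffer_size frame_size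
instance (input_slots_state : List (Int × List Int)) (buffer_size : Int) (frame_size : Int) (out : Int) : Decidable (Spec_decode_messages input_slots_state buffer_size frame_size out) := by unfold Spec_decode_messages; infer_instance

-- ===== CLAIM (what is proved, stated in full; the proofs are below) =====
def Claim_equal_decode_messages : Prop := ∀ (input_slots_state : List (Int × List Int)) (buffer_size : Int) (frame_size : Int), Dom_decode_messages input_slots_state buffer_size frame_size → Spec_decode_messages input_slots_state buffer_size frame_size (decode_messages input_slots_state buffer_size frame_size)

-- ===== LEMMAS AND PROOFS =====

-- Both programs repeatedly "peel" a slot holding exactly one message: count it and remove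
-- its subscriber id once from every slot.  A peels by rescanning from the left inside a
-- recursion, B peels in worklist order.  The proof shows each program performs a maximal
-- sequence of peels from the same state, and that all maximal peel sequences have the same
-- length and final state (the peeling rewrite system is confluent).

-- the message lists of the association list, and its keys
def pvVals (d : List (Int × List Int)) : List (List Int) := d.map Prod.snd
def pvKeys (d : List (Int × List Int)) : List Int := d.map Prod.fst

-- remove one occurrence of x from every slot (the abstract effect of both removal loops)
def rmAll (x : Int) (st : List (List Int)) : List (List Int) := st.map (fun l => l.erase x)

-- slot q currently holds exactly one message
def sngAt (st : List (List Int)) (q : Nat) : Prop := (st.getD q []).length = 1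

-- k peels among the first m slots
inductive Peels (m : Nat) : List (List Int) → Nat → List (List Int) → Prop
  | refl (st : List (List Int)) : Peels m st 0 st
  | step {st : List (List Int)} {k : Nat} {st' : List (List Int)} (q : Nat) (hq : q < m)
      (h1 : sngAt st q) (h : Peels m (rmAll ((st.getD q []).headI) st) k st') :
      Peels m st (k + 1) st'

def NormalP (m : Nat) (st : List (List Int)) : Prop := ∀ q, q < m → ¬ sngAt st q

theorem getD_vals (d : List (Int × List Int)) (i : Nat) :
    (pvVals d).getD i [] = (d.getD i (0, [])).2 := by
  simp only [pvVals, List.getD_eq_getElem?_getD, List.getElem?_map]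
  cases h : d[i]? <;> simp

theorem getD_keys (d : List (Int × List Int)) (i : Nat) :
    (pvKeys d).getD i 0 = (d.getD i (0, [])).1 := by
  simp only [pvKeys, List.getD_eq_getElem?_getD, List.getElem?_map]
  cases h : d[i]? <;> simp

theorem getD_rmAll (x : Int) (st : List (List Int)) (q : Nat) :
    (rmAll x st).getD q [] = (st.getD q []).erase x := by
  simp only [rmAll, List.getD_eq_getElem?_getD, List.getElem?_map]
  cases h : st[q]? <;> simp

theorem length_rmAll (x : Int) (st : List (List Int)) : (rmAll x st).length = st.length := by
  simp [rmAll]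

theorem rmAll_comm (x y : Int) (st : List (List Int)) :
    rmAll x (rmAll y st) = rmAll y (rmAll x st) := by
  simp only [rmAll, List.map_map]
  apply List.map_congr_left
  intro l _
  by_cases h : x = y
  · simp [h]
  · simp [Function.comp, List.erase_comm]

theorem singleton_eq {l : List Int} (h : l.length = 1) : l = [l.headI] := by
  cases l with
  | nil => simp at h
  | cons a t => cases t <;> simp_all

theorem sng_lt_length {st : List (List Int)} {q : Nat} (h : sngAt st q) : q < st.length := by
  by_contra hq
  unfold sngAt at h
  rw [List.getD_eq_getElem?_getD, List.getElem?_eq_none (by omega)] at h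
  simp at h

theorem sng_mem {st : List (List Int)} {q : Nat} (h : sngAt st q) :
    st.getD q [] ∈ st ∧ (st.getD q []).headI ∈ st.getD q [] := by
  have hlt : q < st.length := sng_lt_length h
  constructor
  · rw [List.getD_eq_getElem?_getD, List.getElem?_eq_getElem hlt]
    exact List.getElem_mem hlt
  · have hne : st.getD q [] ≠ [] := by
      unfold sngAt at h; intro he; rw [he] at h; simp at h
    cases hl : st.getD q [] with
    | nil => exact absurd hl hne
    | cons a t => simp

theorem msg_rmAll_le (x : Int) (st : List (List Int)) : pvMsgS (rmAll x st) ≤ pvMsgS st := by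
  induction st with
  | nil => simp [pvMsgS, rmAll]
  | cons l t ih =>
    simp only [pvMsgS, rmAll, List.map_cons, List.sum_cons] at *
    have := (List.erase_sublist (l := l) (a := x)).length_le
    omega

theorem msg_rmAll_lt {x : Int} {st : List (List Int)} (h : ∃ l ∈ st, x ∈ l) :
    pvMsgS (rmAll x st) < pvMsgS st := by
  induction st with
  | nil => simp at h
  | cons l t ih =>
    by_cases hxl : x ∈ l
    · have h1 : (l.erase x).length = l.length - 1 := List.length_erase_of_mem hxl
      have h2 : 0 < l.length := List.length_pos_of_mem hxl
      have h3 := msg_rmAll_le x t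
      simp only [pvMsgS, rmAll, List.map_cons, List.sum_cons] at *
      omega
    · rcases h with ⟨l', hl', hx⟩
      rcases List.mem_cons.mp hl' with rfl | hm
      · exact absurd hx hxl
      · have := ih ⟨l', hm, hx⟩
        have h4 : l.erase x = l := List.erase_of_not_mem hxl
        simp only [pvMsgS, rmAll, List.map_cons, List.sum_cons, h4] at *
        omega

theorem msg_pos_of_sng {st : List (List Int)} {q : Nat} (h : sngAt st q) : 1 ≤ pvMsgS st := by
  have hmem := (sng_mem h).1
  unfold sngAt at h
  calc 1 = (st.getD q []).length := h.symm
  _ ≤ pvMsgS st := by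
      unfold pvMsgS
      exact List.le_sum_of_mem (List.mem_map_of_mem hmem)

theorem peels_trans {m : Nat} {st st' st'' : List (List Int)} {k k' : Nat}
    (h : Peels m st k st') (h' : Peels m st' k' st'') : Peels m st (k + k') st'' := by
  induction h with
  | refl => simpa using h'
  | step q hq h1 _ ih =>
    have := Peels.step q hq h1 (ih h')
    simpa [Nat.add_right_comm] using this

theorem msg_peels_le {m : Nat} {st st' : List (List Int)} {k : Nat} (h : Peels m st k st') :
    pvMsgS st' ≤ pvMsgS st := by
  induction h with
  | refl => exact le_rfl
  | step q hq h1 _ ih =>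
    exact le_trans ih (msg_rmAll_le _ _)

theorem peels_normalize (N m : Nat) :
    ∀ st, pvMsgS st ≤ N → ∃ k st', Peels m st k st' ∧ NormalP m st' := by
  induction N with
  | zero =>
    intro st hst
    by_cases hN : NormalP m st
    · exact ⟨0, st, Peels.refl st, hN⟩
    · exfalso
      unfold NormalP at hN; push_neg at hN
      obtain ⟨q, hq, hs⟩ := hN
      have := msg_pos_of_sng hs
      omega
  | succ N ih =>
    intro st hst
    by_cases hN : NormalP m st
    · exact ⟨0, st, Peels.refl st, hN⟩
    · unfold NormalP at hN; push_neg at hN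
      obtain ⟨q, hq, hs⟩ := hN
      have hmem := sng_mem hs
      have hlt := msg_rmAll_lt ⟨_, hmem.1, hmem.2⟩
      obtain ⟨k, st', hp, hn⟩ := ih (rmAll ((st.getD q []).headI) st) (by omega)
      exact ⟨k + 1, st', Peels.step q hq hs hp, hn⟩

theorem erase_single_ne {a b : Int} (h : ¬ a = b) : [b].erase a = [b] := by
  rw [List.erase_cons, if_neg (by simp [Ne.symm h])]
  simp

theorem peels_unique (N m : Nat) :
    ∀ st, pvMsgS st ≤ N →
      ∀ {k1 st1 k2 st2}, Peels m st k1 st1 → NormalP m st1 → Peels m st k2 st2 →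
        NormalP m st2 → k1 = k2 ∧ st1 = st2 := by
  induction N with
  | zero =>
    intro st hst k1 st1 k2 st2 h1 hn1 h2 hn2
    cases h1 with
    | refl =>
      cases h2 with
      | refl => exact ⟨rfl, rfl⟩
      | step q hq hs h => exact absurd hs (hn1 q hq)
    | step q hq hs h =>
      have := msg_pos_of_sng hs
      omega
  | succ N ih =>
    intro st hst k1 st1 k2 st2 h1 hn1 h2 hn2
    cases h1 with
    | refl =>
      cases h2 with
      | refl => exact ⟨rfl, rfl⟩
      | step q hq hs h => exact absurd hs (hn1 q hq)
    | step q1 hq1 hs1 t1 =>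
      cases h2 with
      | refl => exact absurd hs1 (hn2 q1 hq1)
      | step q2 hq2 hs2 t2 =>
        have hm1 := sng_mem hs1
        have hlt1 : pvMsgS (rmAll ((st.getD q1 []).headI) st) < pvMsgS st :=
          msg_rmAll_lt ⟨_, hm1.1, hm1.2⟩
        have hm2 := sng_mem hs2
        have hlt2 : pvMsgS (rmAll ((st.getD q2 []).headI) st) < pvMsgS st :=
          msg_rmAll_lt ⟨_, hm2.1, hm2.2⟩
        by_cases hx : (st.getD q1 []).headI = (st.getD q2 []).headI
        · have h := ih (rmAll ((st.getD q1 []).headI) st) (by omega) t1 hn1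
            (by rw [hx]; exact t2) hn2
          exact ⟨by omega, h.2⟩
        · have e2 : st.getD q2 [] = [(st.getD q2 []).headI] := singleton_eq hs2
          have e1 : st.getD q1 [] = [(st.getD q1 []).headI] := singleton_eq hs1
          have hsng : sngAt (rmAll ((st.getD q1 []).headI) st) q2 := by
            unfold sngAt
            rw [getD_rmAll, e2, erase_single_ne hx]
            simp
          have hhead : ((rmAll ((st.getD q1 []).headI) st).getD q2 []).headI =
              (st.getD q2 []).headI := by
            rw [getD_rmAll, e2, erase_single_ne hx]
          have hsng2 : sngAt (rmAll ((st.getD q2 []).headI) st) q1 := by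
            unfold sngAt
            rw [getD_rmAll, e1, erase_single_ne (Ne.symm hx)]
            simp
          have hhead2 : ((rmAll ((st.getD q2 []).headI) st).getD q1 []).headI =
              (st.getD q1 []).headI := by
            rw [getD_rmAll, e1, erase_single_ne (Ne.symm hx)]
          obtain ⟨kt, nt, hpt, hnt⟩ := peels_normalize
            (pvMsgS (rmAll ((st.getD q2 []).headI) (rmAll ((st.getD q1 []).headI) st))) m
            (rmAll ((st.getD q2 []).headI) (rmAll ((st.getD q1 []).headI) st)) le_rfl
          have hstep1 : Peels m (rmAll ((st.getD q1 []).headI) st) (kt + 1) nt := by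
            refine Peels.step q2 hq2 hsng ?_
            rw [hhead]
            exact hpt
          have hstep2 : Peels m (rmAll ((st.getD q2 []).headI) st) (kt + 1) nt := by
            refine Peels.step q1 hq1 hsng2 ?_
            rw [hhead2, rmAll_comm]
            exact hpt
          have r1 := ih (rmAll ((st.getD q1 []).headI) st) (by omega) t1 hn1 hstep1 hnt
          have r2 := ih (rmAll ((st.getD q2 []).headI) st) (by omega) t2 hn2 hstep2 hnt
          exact ⟨by omega, r1.2.trans r2.2.symm⟩

-- facts about B's bound(): every position before it has key <= s, the position at it (if any) has key > s
theorem bBound_le (keys : List Int) (s : Int) : ∀ j, bBound keys s j ≤ keys.length := by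
  have H : ∀ t j, keys.length - j ≤ t → bBound keys s j ≤ keys.length := by
    intro t
    induction t with
    | zero =>
      intro j h
      rw [bBound]
      split_ifs with h1 h2
      · omega
      · omega
      · exact le_rfl
    | succ t ih =>
      intro j h
      rw [bBound]
      split_ifs with h1 h2
      · omega
      · exact ih (j + 1) (by omega)
      · exact le_rfl
  intro j
  exact H (keys.length - j) j le_rfl

theorem bBound_not_gt (keys : List Int) (s : Int) :
    ∀ j i, j ≤ i → i < bBound keys s j → ¬ keys.getD i 0 > s := by
  have H : ∀ t j i, keys.length - j ≤ t → j ≤ i → i < bBound keys s j →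
      ¬ keys.getD i 0 > s := by
    intro t
    induction t with
    | zero =>
      intro j i h hji hb
      rw [bBound] at hb
      split_ifs at hb with h1 h2
      · omega
      · omega
      · have := bBound_le keys s (j + 1)
        omega
    | succ t ih =>
      intro j i h hji hb
      rw [bBound] at hb
      split_ifs at hb with h1 h2
      · omega
      · rcases Nat.eq_or_lt_of_le hji with rfl | hlt
        · exact h2
        · exact ih (j + 1) i (by omega) (by omega) hb
      · omega
  intro j i hji hb
  exact H (keys.length - j) j i le_rfl hji hb

theorem bBound_gt (keys : List Int) (s : Int) :
    ∀ j, j ≤ bBound keys s j → bBound keys s j < keys.length →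
      keys.getD (bBound keys s j) 0 > s := by
  have H : ∀ t j, keys.length - j ≤ t → bBound keys s j < keys.length →
      keys.getD (bBound keys s j) 0 > s := by
    intro t
    induction t with
    | zero =>
      intro j h hb
      rw [bBound] at hb ⊢
      split_ifs at hb ⊢ with h1 h2
      · exact h2
      · omega
      · omega
    | succ t ih =>
      intro j h hb
      rw [bBound] at hb ⊢
      split_ifs at hb ⊢ with h1 h2
      · exact h2
      · exact ih (j + 1) (by omega) hb
      · omega
  intro j _ hb
  exact H (keys.length - j) j le_rfl hb

-- facts about B's remove_everywhere: it erases x from every slot and reports exactly the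
-- positions that end up holding one message
theorem removeB_fst (x : Int) : ∀ (slots : List (List Int)) (base : Nat),
    (removeB x slots base).1 = rmAll x slots := by
  intro slots
  induction slots with
  | nil => intro base; simp [removeB, rmAll]
  | cons l t ih =>
    intro base
    by_cases hx : x ∈ l
    · simp [removeB, rmAll, hx, ih]
    · simp [removeB, rmAll, hx, ih, List.erase_of_not_mem hx]

theorem mem_removeB_snd (x : Int) : ∀ (slots : List (List Int)) (base q : Nat),
    q ∈ (removeB x slots base).2 ↔
      ∃ j, j < slots.length ∧ q = base + j ∧ x ∈ slots.getD j [] ∧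
        ((slots.getD j []).erase x).length = 1 := by
  intro slots
  induction slots with
  | nil =>
    intro base q
    simp [removeB]
  | cons l t ih =>
    intro base q
    have hstep : ∀ P : Nat → Prop, (∃ j, j < t.length + 1 ∧ P j) ↔
        (P 0 ∨ ∃ j', j' < t.length ∧ P (j' + 1)) := by
      intro P
      constructor
      · rintro ⟨j, hj, hp⟩
        cases j with
        | zero => exact Or.inl hp
        | succ j' => exact Or.inr ⟨j', by omega, hp⟩
      · rintro (hp | ⟨j', hj', hp⟩)
        · exact ⟨0, by omega, hp⟩
        · exact ⟨j' + 1, by omega, hp⟩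
    by_cases hx : x ∈ l
    · by_cases h1 : (l.erase x).length = 1
      · simp only [removeB, if_pos hx, if_pos h1, List.length_cons, List.mem_cons]
        rw [hstep (fun j => q = base + j ∧ x ∈ (l :: t).getD j [] ∧
          (((l :: t).getD j []).erase x).length = 1)]
        simp only [List.getD_cons_zero, List.getD_cons_succ]
        rw [ih (base + 1) q]
        constructor
        · rintro (rfl | h)
          · exact Or.inl ⟨by omega, hx, h1⟩
          · rcases h with ⟨j', hj', rfl, hm, hl⟩
            exact Or.inr ⟨j', hj', by omega, hm, hl⟩
        · rintro (⟨hq, _, _⟩ | ⟨j', hj', hq, hm, hl⟩)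
          · exact Or.inl (by omega)
          · exact Or.inr ⟨j', hj', by omega, hm, hl⟩
      · simp only [removeB, if_pos hx, if_neg h1, List.length_cons]
        rw [hstep (fun j => q = base + j ∧ x ∈ (l :: t).getD j [] ∧
          (((l :: t).getD j []).erase x).length = 1)]
        simp only [List.getD_cons_zero, List.getD_cons_succ]
        rw [ih (base + 1) q]
        constructor
        · rintro ⟨j', hj', rfl, hm, hl⟩
          exact Or.inr ⟨j', hj', by omega, hm, hl⟩
        · rintro (⟨hq, _, hl⟩ | ⟨j', hj', hq, hm, hl⟩)
          · exact absurd hl h1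
          · exact ⟨j', hj', by omega, hm, hl⟩
    · simp only [removeB, if_neg hx, List.length_cons]
      rw [hstep (fun j => q = base + j ∧ x ∈ (l :: t).getD j [] ∧
        (((l :: t).getD j []).erase x).length = 1)]
      simp only [List.getD_cons_zero, List.getD_cons_succ]
      rw [ih (base + 1) q]
      constructor
      · rintro ⟨j', hj', rfl, hm, hl⟩
        exact Or.inr ⟨j', hj', by omega, hm, hl⟩
      · rintro (⟨hq, hm, _⟩ | ⟨j', hj', hq, hm, hl⟩)
        · exact absurd hm hx
        · exact ⟨j', hj', by omega, hm, hl⟩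

theorem removeB_snd_len (x : Int) : ∀ (slots : List (List Int)) (base : Nat),
    (removeB x slots base).2.length + pvMsgS (rmAll x slots) ≤ pvMsgS slots := by
  intro slots
  induction slots with
  | nil => intro base; simp [removeB, rmAll, pvMsgS]
  | cons l t ih =>
    intro base
    have iht := ih (base + 1)
    by_cases hx : x ∈ l
    · have h1 : (l.erase x).length = l.length - 1 := List.length_erase_of_mem hx
      have h2 : 0 < l.length := List.length_pos_of_mem hx
      by_cases hl1 : (l.erase x).length = 1
      · simp only [removeB, if_pos hx, if_pos hl1, pvMsgS, rmAll, List.map_cons,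
          List.sum_cons, List.length_cons] at *
        omega
      · simp only [removeB, if_pos hx, if_neg hl1, pvMsgS, rmAll, List.map_cons,
          List.sum_cons] at *
        omega
    · have h3 : l.erase x = l := List.erase_of_not_mem hx
      simp only [removeB, if_neg hx, pvMsgS, rmAll, List.map_cons, List.sum_cons, h3] at *
      omega

-- facts about A's removal loop
theorem vals_icRemove (x : Int) (d : List (Int × List Int)) :
    pvVals (icRemove x d) = rmAll x (pvVals d) := by
  simp only [pvVals, icRemove, rmAll, List.map_map]
  apply List.map_congr_left
  intro km _
  by_cases h : x ∈ km.2 <;> simp [Function.comp, h, List.erase_of_not_mem]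

theorem keys_icRemove (x : Int) (d : List (Int × List Int)) :
    pvKeys (icRemove x d) = pvKeys d := by
  simp [pvKeys, icRemove]

theorem pvMsgD_eq (d : List (Int × List Int)) : pvMsgD d = pvMsgS (pvVals d) := by
  simp only [pvMsgD, pvMsgS, pvVals, List.map_map]
  rfl

-- A's interference_cancellation performs one removal followed by a maximal peel sequence
def ICOK (fuel : Nat) : Prop := ∀ (d : List (Int × List Int)) (s x : Int),
  pvMsgS (pvVals d) < fuel → (∃ l ∈ pvVals d, x ∈ l) →
  ∃ (k : Nat) (d' : List (Int × List Int)), ic fuel d s x = ((k : Int), d') ∧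
    pvKeys d' = pvKeys d ∧
    Peels (bBound (pvKeys d) s 0) (rmAll x (pvVals d)) k (pvVals d') ∧
    NormalP (bBound (pvKeys d) s 0) (pvVals d')

theorem icGo_ok (fuel : Nat) (hic : ICOK fuel) (n : Nat) (keys0 : List Int) (s : Int)
    (hn : n = keys0.length) :
    ∀ (t i : Nat) (d : List (Int × List Int)), n - i ≤ t → d.length = n → pvKeys d = keys0 →
      i ≤ bBound keys0 s 0 → (∀ q, q < i → ¬ sngAt (pvVals d) q) →
      pvMsgS (pvVals d) < fuel →
      ∃ (k : Nat) (d' : List (Int × List Int)), icGo fuel n d s i = ((k : Int), d') ∧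
        pvKeys d' = keys0 ∧ Peels (bBound keys0 s 0) (pvVals d) k (pvVals d') ∧
        NormalP (bBound keys0 s 0) (pvVals d') := by
  intro t
  induction t with
  | zero =>
    intro i d ht hlen hkeys him hnos hmsg
    have hin : ¬ i < n := by omega
    refine ⟨0, d, ?_, hkeys, Peels.refl _, ?_⟩
    · rw [icGo, if_neg hin]
      simp
    · intro q hq
      have hb := bBound_le keys0 s 0
      exact hnos q (by omega)
  | succ t ih =>
    intro i d ht hlen hkeys him hnos hmsg
    by_cases hin : i < n
    · have hkey : keys0.getD i 0 = (d.getD i (0, [])).1 := by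
        rw [← hkeys]; exact getD_keys d i
      by_cases hgt : (d.getD i (0, [])).1 > s
      · have hmi : bBound keys0 s 0 ≤ i := by
          by_contra hc
          have hng := bBound_not_gt keys0 s 0 i (Nat.zero_le _) (by omega)
          rw [hkey] at hng
          exact hng hgt
        refine ⟨0, d, ?_, hkeys, Peels.refl _, ?_⟩
        · rw [icGo, if_pos hin]
          simp only [if_pos hgt]
          simp
        · intro q hq
          exact hnos q (by omega)
      · have him' : i < bBound keys0 s 0 := by
          rcases Nat.eq_or_lt_of_le him with he | h
          · exfalso
            have hblt : bBound keys0 s 0 < keys0.length := by omega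
            have := bBound_gt keys0 s 0 (Nat.zero_le _) hblt
            rw [← he, hkey] at this
            exact hgt this
          · exact h
        by_cases h1 : (d.getD i (0, [])).2.length = 1
        · have hsngi : sngAt (pvVals d) i := by
            unfold sngAt
            rw [getD_vals]
            exact h1
          have hhead : ((pvVals d).getD i []).headI = (d.getD i (0, [])).2.headI := by
            rw [getD_vals]
          have hmem := sng_mem hsngi
          have hpres : ∃ l ∈ pvVals d, (d.getD i (0, [])).2.headI ∈ l :=
            ⟨_, hmem.1, hhead ▸ hmem.2⟩
          obtain ⟨k1, d1, hiceq, hk1, hp1, hn1⟩ :=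
            hic d s ((d.getD i (0, [])).2.headI) hmsg hpres
          rw [hkeys] at hp1 hn1
          have hlen1 : d1.length = n := by
            have h := congrArg List.length hk1
            simp only [pvKeys, List.length_map] at h
            omega
          have hmsg1 : pvMsgS (pvVals d1) < fuel := by
            have ha := msg_peels_le hp1
            have hb := msg_rmAll_le ((d.getD i (0, [])).2.headI) (pvVals d)
            omega
          obtain ⟨k2, d2, heq2, hk2, hp2, hn2⟩ := ih (i + 1) d1 (by omega) hlen1 (hk1.trans hkeys)
            (by omega) (fun q hq => hn1 q (by omega)) hmsg1
          refine ⟨k1 + k2 + 1, d2, ?_, hk2, ?_, hn2⟩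
          · rw [icGo, if_pos hin]
            simp only [if_neg hgt, if_pos h1, hiceq, heq2]
            congr 1
            push_cast
            ring
          · have htr := peels_trans hp1 hp2
            exact Peels.step i him' hsngi (by rw [hhead]; exact htr)
        · have hnos' : ∀ q, q < i + 1 → ¬ sngAt (pvVals d) q := by
            intro q hq
            by_cases hqi : q = i
            · subst hqi
              intro hsq
              apply h1
              unfold sngAt at hsq
              rw [getD_vals] at hsq
              exact hsq
            · exact hnos q (by omega)
          obtain ⟨k2, d2, heq2, hk2, hp2, hn2⟩ := ih (i + 1) d (by omega) hlen hkeys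
            (by omega) hnos' hmsg
          refine ⟨k2, d2, ?_, hk2, hp2, hn2⟩
          rw [icGo, if_pos hin]
          simp only [if_neg hgt, if_neg h1]
          exact heq2
    · have hin' : ¬ i < n := hin
      refine ⟨0, d, ?_, hkeys, Peels.refl _, ?_⟩
      · rw [icGo, if_neg hin']
        simp
      · intro q hq
        have := bBound_le keys0 s 0
        exact hnos q (by omega)

theorem ic_ok : ∀ fuel, ICOK fuel := by
  intro fuel
  induction fuel with
  | zero =>
    intro d s x hmsg hpres
    omega
  | succ fuel ih =>
    intro d s x hmsg hpres
    have hvals : pvVals (icRemove x d) = rmAll x (pvVals d) := vals_icRemove x d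
    have hkeys : pvKeys (icRemove x d) = pvKeys d := keys_icRemove x d
    have hlen : (icRemove x d).length = (pvKeys d).length := by
      simp [icRemove, pvKeys]
    have hmsg1 : pvMsgS (pvVals (icRemove x d)) < fuel := by
      rw [hvals]
      have := msg_rmAll_lt hpres
      omega
    obtain ⟨k, d', heq, hk, hp, hnrm⟩ := icGo_ok fuel ih (icRemove x d).length (pvKeys d) s
      (by rw [hlen]) ((icRemove x d).length) 0 (icRemove x d) (by omega) rfl hkeys
      (Nat.zero_le _) (fun q hq => absurd hq (Nat.not_lt_zero q)) hmsg1
    refine ⟨k, d', ?_, hk, ?_, hnrm⟩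
    · rw [ic]
      exact heq
    · rw [← hvals]
      exact hp

-- B's cascade performs a maximal peel sequence
theorem cascade_ok : ∀ (fuel : Nat) (slots : List (List Int)) (m : Nat) (pending : List Nat)
    (total : Int), m ≤ slots.length → (∀ q ∈ pending, q < m) →
    (∀ q, q < m → sngAt slots q → q ∈ pending) →
    2 * pvMsgS slots + pending.length < fuel →
    ∃ (k : Nat) (slots' : List (List Int)),
      cascadeGo fuel slots m pending total = (total + (k : Int), slots') ∧
      Peels m slots k slots' ∧ NormalP m slots' ∧ slots'.length = slots.length := by
  intro fuel
  induction fuel with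
  | zero =>
    intro slots m pending total hm hp hs hf
    omega
  | succ fuel ih =>
    intro slots m pending total hm hp hs hf
    cases pending with
    | nil =>
      refine ⟨0, slots, ?_, Peels.refl slots, ?_, rfl⟩
      · simp [cascadeGo]
      · intro q hq hsng
        exact absurd (hs q hq hsng) (by simp)
    | cons q rest =>
      simp only [List.length_cons] at hf
      have hqm : q < m := hp q List.mem_cons_self
      by_cases h1 : (slots.getD q []).length = 1
      · have hsng : sngAt slots q := h1
        have hmm := sng_mem hsng
        have hrb1 : (removeB ((slots.getD q []).headI) slots 0).1 =
            rmAll ((slots.getD q []).headI) slots := removeB_fst _ slots 0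
        have hlt : pvMsgS (rmAll ((slots.getD q []).headI) slots) < pvMsgS slots :=
          msg_rmAll_lt ⟨_, hmm.1, hmm.2⟩
        have hlenb := removeB_snd_len ((slots.getD q []).headI) slots 0
        have hp' : ∀ q' ∈ ((removeB ((slots.getD q []).headI) slots 0).2.filter
            (· < m)).reverse ++ rest, q' < m := by
          intro q' hq'
          rcases List.mem_append.mp hq' with h | h
          · have := List.mem_filter.mp (List.mem_reverse.mp h)
            simpa using this.2
          · exact hp q' (List.mem_cons_of_mem _ h)
        have hs' : ∀ q', q' < m → sngAt (rmAll ((slots.getD q []).headI) slots) q' →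
            q' ∈ ((removeB ((slots.getD q []).headI) slots 0).2.filter
              (· < m)).reverse ++ rest := by
          intro q' hq' hsng'
          unfold sngAt at hsng'
          rw [getD_rmAll] at hsng'
          by_cases hxm : (slots.getD q []).headI ∈ slots.getD q' []
          · apply List.mem_append_left
            rw [List.mem_reverse]
            apply List.mem_filter.mpr
            refine ⟨?_, by simpa using hq'⟩
            rw [mem_removeB_snd]
            exact ⟨q', by omega, by omega, hxm, hsng'⟩
          · rw [List.erase_of_not_mem hxm] at hsng'
            rcases List.mem_cons.mp (hs q' hq' hsng') with rfl | h
            · exact absurd hmm.2 hxm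
            · exact List.mem_append_right _ h
        have hflen : (((removeB ((slots.getD q []).headI) slots 0).2.filter
            (· < m)).reverse ++ rest).length ≤
            (removeB ((slots.getD q []).headI) slots 0).2.length + rest.length := by
          rw [List.length_append, List.length_reverse]
          have := List.length_filter_le (· < m) (removeB ((slots.getD q []).headI) slots 0).2
          omega
        obtain ⟨k, slots', heq, hpe, hno, hle⟩ := ih
          (rmAll ((slots.getD q []).headI) slots) m
          (((removeB ((slots.getD q []).headI) slots 0).2.filter (· < m)).reverse ++ rest)
          (total + 1) (by rw [length_rmAll]; exact hm) hp' hs' (by omega)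
        refine ⟨k + 1, slots', ?_, Peels.step q hqm hsng hpe, hno,
          by rw [hle, length_rmAll]⟩
        simp only [cascadeGo]
        rw [if_pos h1, hrb1, heq]
        congr 1
        push_cast
        ring
      · have hs' : ∀ q', q' < m → sngAt slots q' → q' ∈ rest := by
          intro q' hq' hsng'
          rcases List.mem_cons.mp (hs q' hq' hsng') with rfl | h
          · exact absurd hsng' h1
          · exact h
        obtain ⟨k, slots', heq, hpe, hno, hle⟩ := ih slots m rest total hm
          (fun q' h => hp q' (List.mem_cons_of_mem _ h)) hs' (by omega)
        refine ⟨k, slots', ?_, hpe, hno, hle⟩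
        simp only [cascadeGo]
        rw [if_neg h1]
        exact heq

theorem loop_eq (n : Nat) (keys0 : List Int) (hn : n = keys0.length) :
    ∀ (t i : Nat) (d : List (Int × List Int)) (total : Int), n - i ≤ t → d.length = n →
      pvKeys d = keys0 →
      decodeGoB n keys0 (pvVals d) i total = total + decodeGoA n d i := by
  intro t
  induction t with
  | zero =>
    intro i d total ht hlen hkeys
    have hin : ¬ i < n := by omega
    rw [decodeGoA, if_neg hin, decodeGoB, if_neg hin]
    ring
  | succ t ih =>
    intro i d total ht hlen hkeys
    by_cases hin : i < n
    · have hvg : (pvVals d).getD i [] = (d.getD i (0, [])).2 := getD_vals d i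
      have hskey : keys0.getD i 0 = (d.getD i (0, [])).1 := by
        rw [← hkeys]; exact getD_keys d i
      by_cases h1 : (d.getD i (0, [])).2.length = 1
      · have hsngi : sngAt (pvVals d) i := by
          unfold sngAt; rw [hvg]; exact h1
        have hmem := sng_mem hsngi
        have hhead : ((pvVals d).getD i []).headI = (d.getD i (0, [])).2.headI := by
          rw [hvg]
        have hpres : ∃ l ∈ pvVals d, (d.getD i (0, [])).2.headI ∈ l :=
          ⟨_, hmem.1, hhead ▸ hmem.2⟩
        have hfuel : pvMsgS (pvVals d) < pvMsgD d + 1 := by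
          rw [pvMsgD_eq]; omega
        obtain ⟨kA, dA, hicA, hkA, hpA, hnA⟩ := ic_ok (pvMsgD d + 1) d ((d.getD i (0, [])).1)
          ((d.getD i (0, [])).2.headI) hfuel hpres
        rw [hkeys] at hpA hnA
        rw [← hskey] at hpA hnA
        have hmlen : bBound keys0 (keys0.getD i 0) 0 ≤
            (rmAll ((d.getD i (0, [])).2.headI) (pvVals d)).length := by
          rw [length_rmAll]
          have h2 : (pvVals d).length = d.length := by simp [pvVals]
          have hb := bBound_le keys0 (keys0.getD i 0) 0
          omega
        have hpm : ∀ q ∈ ((List.range (bBound keys0 (keys0.getD i 0) 0)).filter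
            (fun q => (((rmAll ((d.getD i (0, [])).2.headI) (pvVals d)).getD q []).length
              == 1))).reverse, q < bBound keys0 (keys0.getD i 0) 0 := by
          intro q hq
          rw [List.mem_reverse] at hq
          exact List.mem_range.mp (List.mem_filter.mp hq).1
        have hsm : ∀ q, q < bBound keys0 (keys0.getD i 0) 0 →
            sngAt (rmAll ((d.getD i (0, [])).2.headI) (pvVals d)) q →
            q ∈ ((List.range (bBound keys0 (keys0.getD i 0) 0)).filter
              (fun q => (((rmAll ((d.getD i (0, [])).2.headI) (pvVals d)).getD q []).length
                == 1))).reverse := by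
          intro q hq hsq
          rw [List.mem_reverse]
          refine List.mem_filter.mpr ⟨List.mem_range.mpr hq, ?_⟩
          simpa using hsq
        obtain ⟨kB, slotsB, hcasc, hpB, hnB, hlB⟩ := cascade_ok
          (2 * pvMsgS (rmAll ((d.getD i (0, [])).2.headI) (pvVals d)) +
            (((List.range (bBound keys0 (keys0.getD i 0) 0)).filter
              (fun q => (((rmAll ((d.getD i (0, [])).2.headI) (pvVals d)).getD q []).length
                == 1))).reverse).length + 1)
          (rmAll ((d.getD i (0, [])).2.headI) (pvVals d))
          (bBound keys0 (keys0.getD i 0) 0)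
          (((List.range (bBound keys0 (keys0.getD i 0) 0)).filter
            (fun q => (((rmAll ((d.getD i (0, [])).2.headI) (pvVals d)).getD q []).length
              == 1))).reverse)
          0 hmlen hpm hsm (by omega)
        obtain ⟨hkk, hss⟩ := peels_unique
          (pvMsgS (rmAll ((d.getD i (0, [])).2.headI) (pvVals d)))
          (bBound keys0 (keys0.getD i 0) 0)
          (rmAll ((d.getD i (0, [])).2.headI) (pvVals d)) le_rfl hpB hnB hpA hnA
        have hlenA : dA.length = n := by
          have h := congrArg List.length hkA
          simp only [pvKeys, List.length_map] at h
          omega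
        have ihn := ih (i + 1) dA (total + 1 + (0 + (kB : Int))) (by omega) hlenA
          (hkA.trans hkeys)
        rw [decodeGoA, if_pos hin, if_pos h1, hicA]
        rw [decodeGoB, if_pos hin,
          if_pos (show ((pvVals d).getD i []).length = 1 by rw [hvg]; exact h1), hhead,
          removeB_fst]
        simp only [hcasc]
        rw [hss, ihn, hkk]
        push_cast
        ring
      · rw [decodeGoA, if_pos hin, if_neg h1]
        rw [decodeGoB, if_pos hin,
          if_neg (show ¬ ((pvVals d).getD i []).length = 1 by rw [hvg]; exact h1)]
        exact ih (i + 1) d total (by omega) hlen hkeys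
    · rw [decodeGoA, if_neg hin, decodeGoB, if_neg hin]
      ring

-- ===== VERDICT (by name: the statement is the Claim_ definition above) =====
theorem decode_messages_spec : Claim_equal_decode_messages := by
  intro st bs fs _hdom
  unfold Spec_decode_messages decode_messages decode_messages_alt
  have h := loop_eq st.length (st.map Prod.fst) (by simp) st.length 0 st 0
    (by omega) rfl rfl
  simpa [pvVals] using h.symm
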